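-- pv_equiv track=rewrite | github.com/jerrashi/cmsc12100-aut-19-jerryshi | pp/kattis/blackfriday.py | solve
-- ===== SOURCE A (Python) =====
-- def solve(rolls):
--     """
--     Parameters:
--      - rolls: List of integers. The outcome of each participant's die roll.
--
--     Returns: Integer, or None.
--              The index of the participat that has the highest unique outcome.
--              If no such participant exists, return None.
--     """
--
--     rv = None
--     max_value = 0
--
--     for position, roll in enumerate(rolls):
--         if roll > max_value:
--             rest_of_rolls = rolls[0:position] + rolls[position + 1:]
--             if roll not in rest_of_rolls:
--                 rv = position + 1
--                 max_value = roll
--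
--     return rv
-- ===== SOURCE B (Python) =====
-- def solve(rolls):
--     counts = {}
--     for v in rolls:
--         counts[v] = counts.get(v, 0) + 1
--     best = 0
--     for v, c in counts.items():
--         if c == 1 and v > best:
--             best = v
--     if best > 0:
--         return rolls.index(best) + 1
--     return None
-- ===== Notes on version B (the rewrite author's own statement) =====
-- stated objective: faster
-- what changed: Replaces the per-position rescan of the rest of the list with a count dictionary built once and a loop over distinct values, then one index lookup for the winner.
import Mathlib
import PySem

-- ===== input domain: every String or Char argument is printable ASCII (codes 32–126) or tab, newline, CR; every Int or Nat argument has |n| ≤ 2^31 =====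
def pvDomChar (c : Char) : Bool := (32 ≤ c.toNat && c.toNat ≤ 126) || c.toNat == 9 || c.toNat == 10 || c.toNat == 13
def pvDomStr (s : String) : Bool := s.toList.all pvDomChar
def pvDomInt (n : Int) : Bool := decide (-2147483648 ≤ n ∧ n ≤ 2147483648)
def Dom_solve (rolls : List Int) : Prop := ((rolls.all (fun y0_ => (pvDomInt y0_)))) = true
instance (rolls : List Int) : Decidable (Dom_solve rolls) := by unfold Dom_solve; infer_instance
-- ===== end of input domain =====

-- B replaces A's per-position rescan by a count dictionary built once plus one loop over
-- distinct values and a single index lookup (faster: O(n) vs O(n^2)).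


-- ===== PORT A =====
def solve (rolls : List Int) : Option Int :=
  let st := (PySem.List.enumerate rolls 0).foldl
    (fun (s : Option Int × Int) pr =>
      let position := pr.1
      let roll := pr.2
      if s.2 < roll then
        let rest_of_rolls := PySem.List.slice rolls (some 0) (some position) ++
                             PySem.List.slice rolls (some (position + 1)) none
        if roll ∉ rest_of_rolls then (some (position + 1), roll) else s
      else s)
    (none, 0)
  st.1

-- ===== PORT B =====
def solve_alt (rolls : List Int) : Option Int :=
  let counts := rolls.foldl (fun (d : PySem.Dict Int Int) v => d.insert v (d.getD v 0 + 1))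
    PySem.Dict.empty
  let best := counts.items.foldl (fun (best : Int) p =>
    if p.2 = 1 ∧ best < p.1 then p.1 else best) 0
  if 0 < best then
    match PySem.List.index? rolls best with   -- rolls.index(best); best > 0 implies best ∈ rolls
    | some k => some ((k : Int) + 1)
    | none => none
  else none

-- ===== PRECONDITION & SPEC =====
def Spec_solve (rolls : List Int) (out : Option Int) : Prop := out = solve_alt rolls
instance (rolls : List Int) (out : Option Int) : Decidable (Spec_solve rolls out) := by unfold Spec_solve; infer_instance

-- ===== CLAIM (what is proved, stated in full; the proofs are below) =====
def Claim_equal_solve : Prop := ∀ (rolls : List Int), Dom_solve rolls → Spec_solve rolls (solve rolls)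

-- ===== LEMMAS AND PROOFS =====

-- the max-tracking step, parametrised by the (fixed) count function
def mstep (cnt : Int → Nat) (m v : Int) : Int := if cnt v = 1 ∧ m < v then v else m

theorem mstep_le (cnt : Int → Nat) (m v : Int) : m ≤ mstep cnt m v := by
  unfold mstep; split_ifs with h
  · exact le_of_lt h.2
  · exact le_refl m

theorem mfold_mem (cnt : Int → Nat) (l : List Int) (m0 : Int)
    (h : l.foldl (mstep cnt) m0 ≠ m0) :
    l.foldl (mstep cnt) m0 ∈ l ∧ cnt (l.foldl (mstep cnt) m0) = 1 ∧
      m0 < l.foldl (mstep cnt) m0 := by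
  induction l generalizing m0 with
  | nil => simp at h
  | cons x xs ih =>
    simp only [List.foldl_cons] at h ⊢
    by_cases hx : xs.foldl (mstep cnt) (mstep cnt m0 x) = mstep cnt m0 x
    · rw [hx] at h ⊢
      unfold mstep at h ⊢
      split_ifs at h ⊢ with hc
      · exact ⟨List.mem_cons_self, hc.1, hc.2⟩
      · exact absurd rfl h
    · obtain ⟨hm, hc, hlt⟩ := ih (mstep cnt m0 x) hx
      exact ⟨List.mem_cons_of_mem _ hm, hc, lt_of_le_of_lt (mstep_le cnt m0 x) hlt⟩

-- A's loop (with the rest-of-list test replaced by the count test) computed in closed form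
theorem foldA_eq (cnt : Int → Nat) (l : List Int) :
    ∀ (s : Int) (rv0 : Option Int) (m0 : Int),
    (∀ v, cnt v = 1 → l.count v ≤ 1) →
    (PySem.List.enumerate l s).foldl
      (fun (st : Option Int × Int) pr =>
        if cnt pr.2 = 1 ∧ st.2 < pr.2 then (some (pr.1 + 1), pr.2) else st)
      (rv0, m0)
    = (if l.foldl (mstep cnt) m0 = m0 then rv0
       else some (s + (l.idxOf (l.foldl (mstep cnt) m0) : Int) + 1),
       l.foldl (mstep cnt) m0) := by
  induction l with
  | nil => intro s rv0 m0 _; simp [PySem.List.enumerate]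
  | cons x xs ih =>
    intro s rv0 m0 hcnt
    rw [PySem.List.enumerate_cons]
    rw [List.foldl_cons, List.foldl_cons]
    simp only []
    have hcnt' : ∀ v, cnt v = 1 → xs.count v ≤ 1 := by
      intro v hv
      have := hcnt v hv
      by_cases hxv : x = v
      · subst hxv; simp [List.count_cons_self] at this; omega
      · simpa [List.count_cons, hxv] using this
    by_cases hx : cnt x = 1 ∧ m0 < x
    · -- update fires at x
      have hm : mstep cnt m0 x = x := by unfold mstep; rw [if_pos hx]
      rw [if_pos hx, hm, ih (s + 1) (some (s + 1)) x hcnt']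
      by_cases hfix : xs.foldl (mstep cnt) x = x
      · rw [hfix]
        have hne : ¬ (x = m0) := ne_of_gt hx.2
        rw [if_pos rfl, if_neg hne]
        simp [List.idxOf_cons_self]
      · obtain ⟨hm', hc, hlt⟩ := mfold_mem cnt xs x hfix
        have hne0 : ¬ (xs.foldl (mstep cnt) x = m0) := ne_of_gt (lt_trans hx.2 hlt)
        have hxne : x ≠ xs.foldl (mstep cnt) x := ne_of_lt hlt
        rw [if_neg hfix, if_neg hne0]
        have hidx : (x :: xs).idxOf (xs.foldl (mstep cnt) x)
            = xs.idxOf (xs.foldl (mstep cnt) x) + 1 := by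
          simp [hxne]
        rw [hidx]
        simp only [Prod.mk.injEq, Option.some.injEq]
        refine ⟨?_, trivial⟩
        push_cast; ring
    · -- no update at x
      have hm : mstep cnt m0 x = m0 := by unfold mstep; rw [if_neg hx]
      rw [if_neg hx, hm, ih (s + 1) rv0 m0 hcnt']
      by_cases hfix : xs.foldl (mstep cnt) m0 = m0
      · rw [hfix]; simp
      · obtain ⟨hm', hc, hlt⟩ := mfold_mem cnt xs m0 hfix
        have hxne : x ≠ xs.foldl (mstep cnt) m0 := by
          intro he
          exact hx ⟨by rw [he]; exact hc, by rw [he]; exact hlt⟩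
        rw [if_neg hfix, if_neg hfix]
        have hidx : (x :: xs).idxOf (xs.foldl (mstep cnt) m0)
            = xs.idxOf (xs.foldl (mstep cnt) m0) + 1 := by
          simp [hxne]
        rw [hidx]
        simp only [Prod.mk.injEq, Option.some.injEq]
        refine ⟨?_, trivial⟩
        push_cast; ring

-- the rest-of-rolls membership test is the count-1 test
theorem notin_rest_iff (rolls : List Int) (k : Nat) (hk : k < rolls.length) :
    (rolls[k] ∉ PySem.List.slice rolls (some 0) (some (k:Int)) ++
        PySem.List.slice rolls (some ((k:Int) + 1)) none)
    ↔ rolls.count rolls[k] = 1 := by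
  have h1 : PySem.List.slice rolls (some 0) (some (k:Int)) = rolls.take k := by
    simp [PySem.List.slice_zero_start, PySem.List.slice_to_natCast]
  have h2 : PySem.List.slice rolls (some ((k:Int) + 1)) none = rolls.drop (k+1) := by
    have h : ((k:Int) + 1) = ((k+1 : Nat) : Int) := by push_cast; ring
    rw [h, PySem.List.slice_from_natCast]
  rw [h1, h2]
  obtain ⟨v, hv⟩ : ∃ v, rolls[k] = v := ⟨_, rfl⟩
  rw [hv]
  have hsplit : rolls = rolls.take k ++ v :: rolls.drop (k+1) := by
    conv_lhs => rw [← List.take_append_drop k rolls]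
    congr 1
    rw [List.drop_eq_getElem_cons hk, hv]
  have hcount : rolls.count v = (rolls.take k ++ rolls.drop (k+1)).count v + 1 := by
    conv_lhs => rw [hsplit]
    simp [List.count_append, List.count_cons_self]
    ring
  rw [hcount, ← List.count_eq_zero]
  omega

-- fold of mstep skips values it ignores: restrict to the unique elements
theorem mfold_filter (cnt : Int → Nat) (l : List Int) (m0 : Int) :
    l.foldl (mstep cnt) m0 = (l.filter (fun v => cnt v == 1)).foldl (mstep cnt) m0 := by
  induction l generalizing m0 with
  | nil => rfl
  | cons x xs ih =>
    by_cases hx : cnt x = 1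
    · simp [hx, ih]
    · have : mstep cnt m0 x = m0 := by unfold mstep; rw [if_neg (by tauto)]
      simp [hx, this, ih]

theorem discard_of_not_mem (s : List Int) (x : Int) (h : x ∉ s) :
    PySem.Set.discard s x = s := by
  have : PySem.Set.discard s x = s.filter (fun y => !(y == x)) := rfl
  rw [this]
  apply List.filter_eq_self.mpr
  intro a ha
  simp only [Bool.not_eq_eq_eq_not, Bool.not_true, beq_eq_false_iff_ne]
  intro he; subst he; exact h ha

theorem filter_ofList (p : Int → Bool) (l : List Int)
    (h : ∀ v, p v = true → l.count v ≤ 1) :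
    (PySem.Set.ofList l).filter p = l.filter p := by
  induction l with
  | nil => rfl
  | cons x xs ih =>
    rw [PySem.Set.ofList_cons, List.filter_cons, List.filter_cons]
    have h' : ∀ v, p v = true → xs.count v ≤ 1 := by
      intro v hv
      have := h v hv
      have hle : xs.count v ≤ (x :: xs).count v := by
        rw [List.count_cons]; omega
      exact le_trans hle this
    by_cases hp : p x = true
    · have hnx : x ∉ xs := by
        intro hin
        have h1 := h x hp
        have h2 := List.count_pos_iff.mpr hin
        rw [List.count_cons_self] at h1
        omega
      rw [hp, discard_of_not_mem _ _ (fun hc => hnx (by rw [PySem.Set.mem_ofList] at hc; exact hc)), ih h']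
    · rw [Bool.not_eq_true] at hp
      rw [hp]
      have hd : (PySem.Set.discard (PySem.Set.ofList xs) x).filter p
          = (PySem.Set.ofList xs).filter p := by
        have hdef : PySem.Set.discard (PySem.Set.ofList xs) x
            = (PySem.Set.ofList xs).filter (fun y => !(y == x)) := rfl
        rw [hdef, List.filter_filter]
        apply List.filter_congr
        intro a _
        by_cases hax : a = x
        · subst hax; simp [hp]
        · simp [hax]
      rw [hd, ih h']

theorem index?_of_mem (l : List Int) (a : Int) (h : a ∈ l) :
    PySem.List.index? l a = some (l.idxOf a) := by
  have hs : (PySem.List.index? l a).isSome := by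
    rw [PySem.List.index?_isSome_iff]; exact h
  obtain ⟨i, hi⟩ := Option.isSome_iff_exists.mp hs
  have hid : l.idxOf a = i := by
    rw [List.idxOf_eq_getD_idxOf?, ← PySem.List.index?_eq_idxOf?, hi]; rfl
  rw [hid, hi]

-- B's distinct-value fold equals the mstep fold over all of rolls
theorem best_eq (rolls : List Int) :
    ((PySem.Dict.counter rolls).items).foldl
      (fun (best : Int) p => if p.2 = 1 ∧ best < p.1 then p.1 else best) 0
    = rolls.foldl (mstep (fun v => rolls.count v)) 0 := by
  rw [PySem.Dict.items_counter, List.foldl_map]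
  have hstep : (fun (best : Int) k =>
      if ((rolls.count k : Int) = 1 ∧ best < k) then k else best)
      = mstep (fun v => rolls.count v) := by
    funext best k
    unfold mstep
    by_cases hc : rolls.count k = 1
    · simp [hc]
    · have : ¬ ((rolls.count k : Int) = 1) := by exact_mod_cast hc
      simp [hc, this]
  rw [hstep]
  rw [mfold_filter (fun v => rolls.count v) (PySem.Set.ofList rolls) 0,
      mfold_filter (fun v => rolls.count v) rolls 0]
  rw [filter_ofList (fun v => rolls.count v == 1) rolls
      (by intro v hv; simp only [beq_iff_eq] at hv; omega)]

-- ===== VERDICT (by name: the statement is the Claim_ definition above) =====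
theorem solve_spec : Claim_equal_solve := by
  intro rolls _
  unfold Spec_solve solve solve_alt
  simp only []
  have hcongr : (PySem.List.enumerate rolls 0).foldl
      (fun (s : Option Int × Int) pr =>
        if s.2 < pr.2 then
          (if pr.2 ∉ PySem.List.slice rolls (some 0) (some pr.1) ++
               PySem.List.slice rolls (some (pr.1 + 1)) none
           then (some (pr.1 + 1), pr.2) else s)
        else s) (none, 0)
    = (PySem.List.enumerate rolls 0).foldl
      (fun (st : Option Int × Int) pr =>
        if rolls.count pr.2 = 1 ∧ st.2 < pr.2 then (some (pr.1 + 1), pr.2) else st)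
      (none, 0) := by
    apply PySem.List.foldl_congr_mem
    intro acc pr hpr
    rw [PySem.List.mem_enumerate_iff] at hpr
    obtain ⟨k, hk, hpr⟩ := hpr
    subst hpr
    simp only [zero_add]
    have hiff := notin_rest_iff rolls k hk
    by_cases hlt : acc.2 < rolls[k]
    · rw [if_pos hlt]
      by_cases hcnt : rolls.count rolls[k] = 1
      · rw [if_pos (hiff.mpr hcnt), if_pos ⟨hcnt, hlt⟩]
      · rw [if_neg (fun h => hcnt (hiff.mp h)), if_neg (fun h => hcnt h.1)]
    · rw [if_neg hlt, if_neg (fun h => hlt h.2)]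
  rw [hcongr, foldA_eq (fun v => rolls.count v) rolls 0 none 0 (fun v hv => Nat.le_of_eq hv)]
  rw [PySem.Dict.foldl_insert_getD_add_one_eq_counter, best_eq]
  set M := rolls.foldl (mstep (fun v => rolls.count v)) 0 with hM
  by_cases h0 : M = 0
  · rw [if_pos h0, if_neg (by omega)]
  · obtain ⟨hmem, hc, hpos⟩ := mfold_mem (fun v => rolls.count v) rolls 0 h0
    rw [if_neg h0, if_pos hpos]
    rw [index?_of_mem rolls M hmem]
    simp only [Option.some.injEq]
    ring
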